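-- pv_equiv track=rewrite | github.com/rafa23antunes/ProjectEuler | problem54.py | isThree
-- ===== SOURCE A (Python) =====
-- l = []
--
-- nl = []
--
-- def removeSuit(l):
--     nl = []
--     for i in l:
--         nl.append(i[:-1])
--     return nl
--
-- def isThree(l): #3 of a kind
--     nl = removeSuit(l)
--     for i in nl:
--         c = 0
--         for j in nl:
--             if j == i:
--                 c+=1
--         if c == 3:
--             return True
--     return False
-- ===== SOURCE B (Python) =====
-- def isThree(l):  # 3 of a kind
--     counts = {}
--     for card in l:
--         r = card[:-1]
--         counts[r] = counts.get(r, 0) + 1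
--     return 3 in counts.values()
-- ===== Notes on version B (the rewrite author's own statement) =====
-- stated objective: idiomatic
-- what changed: Replaces A's separate suit-stripping pass plus O(n^2) nested rescan with a single pass building a rank-frequency dict, then one membership test over its values.
import Mathlib
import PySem

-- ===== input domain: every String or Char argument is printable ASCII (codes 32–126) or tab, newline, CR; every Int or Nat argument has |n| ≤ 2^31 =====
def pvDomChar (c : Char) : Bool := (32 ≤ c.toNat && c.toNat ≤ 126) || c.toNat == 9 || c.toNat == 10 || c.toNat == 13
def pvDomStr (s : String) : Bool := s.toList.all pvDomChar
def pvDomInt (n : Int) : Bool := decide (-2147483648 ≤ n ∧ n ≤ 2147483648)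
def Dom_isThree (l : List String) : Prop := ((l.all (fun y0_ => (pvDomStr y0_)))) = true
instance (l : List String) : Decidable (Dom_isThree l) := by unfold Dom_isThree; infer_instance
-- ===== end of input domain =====

-- B builds a rank→count dict in one pass and tests its values, replacing A's nested rescan (idiomatic/faster).

-- ===== PORT A =====
-- removeSuit: nl = []; for i in l: nl.append(i[:-1])
def removeSuit (l : List String) : List String :=
  l.foldl (fun nl i => nl ++ [PySem.Str.slice i none (some (-1))]) []

-- outer loop of A with early return: for i in nl: c = sum over nl of (j == i); if c == 3: return True
def isThreeOuter (nl : List String) : List String → Bool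
  | [] => false
  | i :: rest =>
      let c := nl.foldl (fun c j => if j == i then c + 1 else c) (0 : Int)
      if c == 3 then true else isThreeOuter nl rest

def isThree (l : List String) : Bool :=
  let nl := removeSuit l
  isThreeOuter nl nl

-- ===== PORT B =====
-- r = card[:-1]
def rankOf (card : String) : String := PySem.Str.slice card none (some (-1))

def isThree_alt (l : List String) : Bool :=
  let counts := l.foldl
    (fun d card => d.insert (rankOf card) (d.getD (rankOf card) 0 + 1)) PySem.Dict.empty
  (PySem.Dict.values counts).contains (3 : Int)

-- ===== PRECONDITION & SPEC =====
def Spec_isThree (l : List String) (out : Bool) : Prop := out = isThree_alt l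
instance (l : List String) (out : Bool) : Decidable (Spec_isThree l out) := by unfold Spec_isThree; infer_instance

-- ===== CLAIM (what is proved, stated in full; the proofs are below) =====
def Claim_equal_isThree : Prop := ∀ (l : List String), Dom_isThree l → Spec_isThree l (isThree l)

-- ===== LEMMAS AND PROOFS =====

lemma removeSuit_eq_map (l : List String) :
    removeSuit l = l.map (fun i => PySem.Str.slice i none (some (-1))) := by
  simpa [removeSuit] using
    PySem.List.foldl_append_singleton_eq_map (l := l)
      (f := fun i => PySem.Str.slice i none (some (-1))) (acc := [])

lemma isThreeOuter_eq_any (nl rest : List String) :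
    isThreeOuter nl rest = rest.any (fun i => nl.count i == 3) := by
  induction rest with
  | nil => simp [isThreeOuter]
  | cons i t ih =>
      simp only [isThreeOuter, PySem.List.foldl_beq_add_one, List.any_cons, ih]
      have hc : (((0 : Int) + (nl.count i : Int)) == 3) = (nl.count i == (3 : Nat)) := by
        rw [Bool.eq_iff_iff]; simp; omega
      rw [hc]
      by_cases h : nl.count i = 3 <;> simp [h]

lemma alt_eq_any (l : List String) :
    isThree_alt l =
      (PySem.Set.ofList (removeSuit l)).any
        (fun i => ((removeSuit l).count i : Int) == 3) := by
  unfold isThree_alt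
  show (PySem.Dict.values (l.foldl
      (fun d card => d.insert (rankOf card) (d.getD (rankOf card) 0 + 1)) PySem.Dict.empty)).contains (3 : Int) = _
  rw [← List.foldl_map (f := rankOf)
    (g := fun (d : PySem.Dict String Int) x => d.insert x (d.getD x 0 + 1)) (l := l) (init := PySem.Dict.empty)]
  rw [PySem.Dict.foldl_insert_getD_add_one_eq_counter]
  simp only [PySem.Dict.values, PySem.Dict.items_counter, removeSuit_eq_map]
  rw [Bool.eq_iff_iff]
  simp only [List.contains_iff_exists_mem_beq, List.any_eq_true,
    PySem.Set.mem_ofList, List.mem_map, beq_iff_eq, rankOf]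
  constructor
  · rintro ⟨v, ⟨p, ⟨r, hr, rfl⟩, rfl⟩, h3⟩
    exact ⟨r, hr, by simpa [rankOf] using h3.symm⟩
  · rintro ⟨x, hx, h3⟩
    exact ⟨((x, ((List.map rankOf l).count x : Int)) : String × Int).2,
      ⟨(x, ((List.map rankOf l).count x : Int)), ⟨x, by simpa [rankOf] using hx, rfl⟩, rfl⟩,
      by simpa [rankOf] using h3.symm⟩

-- ===== VERDICT (by name: the statement is the Claim_ definition above) =====
theorem isThree_spec : Claim_equal_isThree := by
  intro l _
  unfold Spec_isThree isThree
  rw [isThreeOuter_eq_any, alt_eq_any]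
  rw [Bool.eq_iff_iff]
  simp only [List.any_eq_true, PySem.Set.mem_ofList]
  constructor
  · rintro ⟨i, hi, h⟩
    refine ⟨i, hi, ?_⟩
    simp only [beq_iff_eq] at h ⊢
    exact_mod_cast h
  · rintro ⟨i, hi, h⟩
    refine ⟨i, hi, ?_⟩
    simp only [beq_iff_eq] at h ⊢
    exact_mod_cast h
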